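-- pv_equiv track=rewrite | github.com/macray-korir/codility1 | AsphaltPatches.py | solution
-- ===== SOURCE A (Python) =====
-- def solution(road):
--     #initializing
--     patch_count = 0
--     num_segments = len(road)
--     segment_index = 0
-- #Start a loop to iterate through the road segments
--     while segment_index < num_segments:
--
--         if road[segment_index] == "X":
--             patch_count += 1
--             segment_index += 3
--
--         else:
--             segment_index += 1
--
--     return patch_count
-- ===== SOURCE B (Python) =====
-- def solution(road):
--     i = road.find("X")
--     if i == -1:
--         return 0
--     return 1 + solution(road[i + 3:])
-- ===== Notes on version B (the rewrite author's own statement) =====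
-- stated objective: alternative
-- what changed: Replaces A's character-by-character while loop with a recursive decomposition: str.find locates the first pothole and the function recurses on the slice past the 3-segment patch.
import Mathlib
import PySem

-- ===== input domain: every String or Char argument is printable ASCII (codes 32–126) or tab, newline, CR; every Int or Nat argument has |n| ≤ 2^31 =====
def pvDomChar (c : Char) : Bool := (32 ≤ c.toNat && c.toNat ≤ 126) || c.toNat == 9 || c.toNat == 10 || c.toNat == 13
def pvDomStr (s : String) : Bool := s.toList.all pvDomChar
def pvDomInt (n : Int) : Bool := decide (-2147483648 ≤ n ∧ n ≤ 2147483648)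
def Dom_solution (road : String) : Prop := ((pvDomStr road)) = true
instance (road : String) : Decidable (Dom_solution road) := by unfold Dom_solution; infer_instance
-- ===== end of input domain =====

-- B replaces A's index-stepping while loop by a recursive decomposition: str.find
-- locates the first 'X' and the function recurses on the slice past the patch
-- (alternative decomposition, same cost). Return values only; no mutation.

-- ===== PORT A =====
-- A's while loop: index advances by 3 after an 'X', by 1 otherwise.
def solutionLoop (l : List Char) (n : Int) (i : Int) (count : Int) : Int :=
  if _h : i < n then
    if PySem.List.pyGet? l i = some 'X' then
      solutionLoop l n (i + 3) (count + 1)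
    else
      solutionLoop l n (i + 1) count
  else count
termination_by (n - i).toNat
decreasing_by all_goals omega

def solution (road : String) : Int :=
  solutionLoop road.toList (road.toList.length : Int) 0 0

-- ===== PORT B =====
-- B's recursion on the string (as its list of code points, per the type convention):
-- i = road.find("X"); if i == -1 return 0; else 1 + solution(road[i+3:]).
def solutionAltGo (l : List Char) : Int :=
  let i := PySem.Chars.find l ['X']
  if h : i = -1 then 0
  else 1 + solutionAltGo (PySem.List.slice l (some (i + 3)) none)
termination_by l.length
decreasing_by
  have h0 : 0 ≤ PySem.Chars.find l ['X'] := by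
    have := PySem.Chars.neg_one_le_find (s := l) (sub := ['X'])
    omega
  have hinf : ['X'] <:+: l := (PySem.Chars.find_nonneg_iff (s := l) (sub := ['X'])).1 h0
  have hne : l ≠ [] := by
    rintro rfl
    simp at hinf
  have hpos : 0 < l.length := List.length_pos_iff.2 hne
  have hjval : PySem.Chars.find l ['X'] = (((PySem.Chars.find l ['X']).toNat : Nat) : Int) := by omega
  rw [hjval, show (((PySem.Chars.find l ['X']).toNat : Nat) : Int) + 3
        = (((PySem.Chars.find l ['X']).toNat + 3 : Nat) : Int) by push_cast; ring,
      PySem.List.slice_from_natCast]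
  simp only [List.length_drop]
  omega

def solution_alt (road : String) : Int := solutionAltGo road.toList

-- ===== PRECONDITION & SPEC =====
def Spec_solution (road : String) (out : Int) : Prop := out = solution_alt road
instance (road : String) (out : Int) : Decidable (Spec_solution road out) := by unfold Spec_solution; infer_instance

-- ===== CLAIM (what is proved, stated in full; the proofs are below) =====
def Claim_equal_solution : Prop := ∀ (road : String), Dom_solution road → Spec_solution road (solution road)

-- ===== LEMMAS AND PROOFS =====

-- a singleton is an infix iff it is a member
theorem singleton_infix_iff (a : Char) (l : List Char) : [a] <:+: l ↔ a ∈ l := by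
  constructor
  · intro h; exact List.singleton_sublist.1 h.sublist
  · intro h
    obtain ⟨s, t, rfl⟩ := List.append_of_mem h
    exact ⟨s, t, by simp⟩

-- find is determined by "occurs at m, not before m"
theorem find_eq_of (l sub : List Char) (m : Nat)
    (hat : sub <+: l.drop m) (hmin : ∀ i < m, ¬ sub <+: l.drop i) :
    PySem.Chars.find l sub = (m : Int) := by
  have hinf : sub <:+: l := by
    obtain ⟨t, ht⟩ := hat
    exact ⟨l.take m, t, by rw [List.append_assoc, ht, List.take_append_drop]⟩
  have h0 : 0 ≤ PySem.Chars.find l sub :=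
    (PySem.Chars.find_nonneg_iff (s := l) (sub := sub)).2 hinf
  obtain ⟨hpre, hlt⟩ := PySem.Chars.find_spec (s := l) (sub := sub) h0
  set f := (PySem.Chars.find l sub).toNat with hf
  have : f = m := by
    rcases Nat.lt_trichotomy f m with h | h | h
    · exact absurd hpre (hmin f h)
    · exact h
    · exact absurd hat (hlt m h)
  omega

-- find on a cons whose head is the sought character is 0
theorem find_cons_self (t : List Char) : PySem.Chars.find ('X' :: t) ['X'] = 0 := by
  have := find_eq_of ('X' :: t) ['X'] 0 (by simp) (by omega)
  simpa using this

-- dropping a non-'X' head does not change B's count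
theorem solutionAltGo_cons_ne (c : Char) (t : List Char) (hc : c ≠ 'X') :
    solutionAltGo (c :: t) = solutionAltGo t := by
  by_cases h : PySem.Chars.find t ['X'] = -1
  · have hnt : ¬ ['X'] <:+: t := (PySem.Chars.find_eq_neg_one_iff (s := t) (sub := ['X'])).1 h
    have hmem : 'X' ∉ t := fun hm => hnt ((singleton_infix_iff _ _).2 hm)
    have hct : PySem.Chars.find (c :: t) ['X'] = -1 := by
      rw [PySem.Chars.find_eq_neg_one_iff]
      intro hi
      rcases List.mem_cons.1 ((singleton_infix_iff _ _).1 hi) with h1 | h1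
      · exact hc h1.symm
      · exact hmem h1
    rw [solutionAltGo.eq_def, solutionAltGo.eq_def]
    simp [hct, h]
  · have h0 : 0 ≤ PySem.Chars.find t ['X'] := by
      have := PySem.Chars.neg_one_le_find (s := t) (sub := ['X'])
      omega
    obtain ⟨hpre, hlt⟩ := PySem.Chars.find_spec (s := t) (sub := ['X']) h0
    set j := (PySem.Chars.find t ['X']).toNat with hj
    have hjval : PySem.Chars.find t ['X'] = (j : Int) := by omega
    have hct : PySem.Chars.find (c :: t) ['X'] = ((j + 1 : Nat) : Int) := by
      apply find_eq_of
      · simpa [List.drop_succ_cons] using hpre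
      · intro i hi
        match i with
        | 0 =>
          simp only [List.drop_zero]
          intro hp
          rcases hp with ⟨u, hu⟩
          simp at hu
          exact hc hu.1.symm
        | (i + 1) =>
          simp only [List.drop_succ_cons]
          exact hlt i (by omega)
    rw [solutionAltGo.eq_def, solutionAltGo.eq_def]
    simp only [hct, hjval]
    have h1 : ¬ ((j + 1 : Nat) : Int) = -1 := by omega
    have h2 : ¬ ((j : Int)) = -1 := by omega
    rw [dif_neg h1, dif_neg h2]
    congr 1
    congr 1
    rw [show ((j + 1 : Nat) : Int) + 3 = ((j + 4 : Nat) : Int) by push_cast; ring,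
        show ((j : Int)) + 3 = ((j + 3 : Nat) : Int) by push_cast; ring,
        PySem.List.slice_from_natCast, PySem.List.slice_from_natCast]
    simp [List.drop_succ_cons]

-- A's loop restarted at index i computes c + B's count on the suffix from i
theorem key_lemma (l : List Char) :
    ∀ (k : Nat) (i : Nat) (c : Int), l.length - i = k →
      solutionLoop l (l.length : Int) (i : Int) c = c + solutionAltGo (l.drop i) := by
  intro k
  induction k using Nat.strong_induction_on with
  | _ k ih =>
  intro i c hk
  by_cases hcase : l.length ≤ i
  · rw [List.drop_eq_nil_of_le hcase]
    rw [solutionLoop]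
    have hn : ¬ ((i : Int) < (l.length : Int)) := by exact_mod_cast not_lt.2 hcase
    rw [dif_neg hn]
    rw [solutionAltGo.eq_def]
    simp [PySem.Chars.find_eq_neg_one_iff]
  · have hi : i < l.length := by omega
    have hdrop : l.drop i = l[i] :: l.drop (i + 1) := List.drop_eq_getElem_cons hi
    have hget : PySem.List.pyGet? l (i : Int) = some l[i] := by
      rw [PySem.List.pyGet?_natCast]; simp [hi]
    have hlt : (i : Int) < (l.length : Int) := by exact_mod_cast hi
    by_cases hx : l[i] = 'X'
    · rw [solutionLoop, dif_pos hlt, if_pos (by rw [hget, hx])]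
      rw [show (i : Int) + 3 = ((i + 3 : Nat) : Int) by push_cast; ring]
      rw [ih (l.length - (i + 3)) (by omega) (i + 3) (c + 1) (by omega)]
      rw [hdrop, hx]
      conv_rhs => rw [solutionAltGo.eq_def]
      simp only [find_cons_self]
      rw [dif_neg (by omega : ¬ (0 : Int) = -1)]
      rw [show (0 : Int) + 3 = ((3 : Nat) : Int) by norm_num, PySem.List.slice_from_natCast]
      have : (('X' :: l.drop (i + 1)).drop 3) = l.drop (i + 3) := by
        simp only [List.drop_succ_cons, List.drop_drop]
      rw [this]
      ring
    · rw [solutionLoop, dif_pos hlt, if_neg (by rw [hget]; simpa using hx)]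
      rw [show (i : Int) + 1 = ((i + 1 : Nat) : Int) by push_cast; ring]
      rw [ih (l.length - (i + 1)) (by omega) (i + 1) c (by omega)]
      rw [hdrop, solutionAltGo_cons_ne _ _ hx]

-- ===== VERDICT (by name: the statement is the Claim_ definition above) =====
theorem solution_spec : Claim_equal_solution := by
  intro road _
  unfold Spec_solution solution solution_alt
  have := key_lemma road.toList (road.toList.length) 0 0 (by omega)
  simpa using this
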